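-- pv_equiv track=rewrite | github.com/anoobshukla/data-structures-algo-lab | Codes/arrProbstrivers/easyArrProb.py | onceTwice
-- ===== SOURCE A (Python) =====
-- def onceTwice(arr):
--     n = len(arr)
--     seen = {}
--     for value in arr:
--         if value in seen:
--             seen[value]+=1
--         else:
--             seen[value] = 1
--
--
--     for value, cnt in seen.items():
--         if cnt == 1 :
--             return value
--     return -1
-- ===== SOURCE B (Python) =====
-- def onceTwice(arr):
--     candidates = {}
--     dupes = set()
--     for value in arr:
--         if value in dupes:
--             continue
--         if value in candidates:
--             del candidates[value]
--             dupes.add(value)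
--         else:
--             candidates[value] = True
--     return next(iter(candidates), -1)
-- ===== Notes on version B (the rewrite author's own statement) =====
-- stated objective: alternative
-- what changed: Replaces the count-everything-then-scan-the-frequency-dict strategy with the classic streaming first-non-repeating algorithm: one pass maintains an insertion-ordered dict of candidates (values seen exactly once) and a set of duplicates, deleting a candidate on its second occurrence, and returns the first surviving candidate (else -1).
import Mathlib
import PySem

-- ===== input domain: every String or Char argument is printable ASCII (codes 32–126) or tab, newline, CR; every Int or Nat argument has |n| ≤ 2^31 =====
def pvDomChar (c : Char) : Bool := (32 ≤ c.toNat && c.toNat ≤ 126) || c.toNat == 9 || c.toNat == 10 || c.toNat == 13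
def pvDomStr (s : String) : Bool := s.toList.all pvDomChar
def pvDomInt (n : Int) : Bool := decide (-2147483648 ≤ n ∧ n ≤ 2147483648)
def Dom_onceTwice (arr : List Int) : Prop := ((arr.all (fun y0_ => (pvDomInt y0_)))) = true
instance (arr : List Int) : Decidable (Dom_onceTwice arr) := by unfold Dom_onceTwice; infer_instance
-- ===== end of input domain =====

-- B replaces A's count-everything-then-scan-the-frequency-dict strategy with the streaming
-- first-non-repeating algorithm: an ordered candidate dict plus a duplicate set, a candidate
-- is deleted on its second occurrence, the answer is the first surviving candidate (else -1).

-- ===== PORT A =====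
-- the second loop of A: over seen.items(), return the first value whose cnt == 1, else -1
def onceTwiceScan : List (Int × Int) → Int
  | [] => -1
  | (value, cnt) :: rest => if cnt = 1 then value else onceTwiceScan rest

def onceTwice (arr : List Int) : Int :=
  let _n : Int := arr.length
  let seen : PySem.Dict Int Int :=
    arr.foldl (fun seen value =>
      if seen.contains value then seen.modify value 0 (· + 1)
      else seen.insert value 1) PySem.Dict.empty
  onceTwiceScan seen.items

-- ===== PORT B =====
-- B's loop body: state is (candidates : insertion-ordered dict, dupes : set);
-- 'del candidates[value]' is Dict.erase, 'candidates[value] = True' is Dict.insert.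
def onceTwiceAltStep (st : PySem.Dict Int Bool × PySem.Set Int) (value : Int) :
    PySem.Dict Int Bool × PySem.Set Int :=
  if value ∈ st.2 then st
  else if st.1.contains value then (st.1.erase value, PySem.Set.add st.2 value)
  else (st.1.insert value true, st.2)

-- 'return next(iter(candidates), -1)': the first key of candidates, else -1
def onceTwice_alt (arr : List Int) : Int :=
  let st := arr.foldl onceTwiceAltStep (PySem.Dict.empty, PySem.Set.empty)
  match st.1.keys with
  | [] => -1
  | v :: _ => v

-- ===== PRECONDITION & SPEC =====
def Spec_onceTwice (arr : List Int) (out : Int) : Prop := out = onceTwice_alt arr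
instance (arr : List Int) (out : Int) : Decidable (Spec_onceTwice arr out) := by unfold Spec_onceTwice; infer_instance

-- ===== CLAIM (what is proved, stated in full; the proofs are below) =====
def Claim_equal_onceTwice : Prop := ∀ (arr : List Int), Dom_onceTwice arr → Spec_onceTwice arr (onceTwice arr)

-- ===== LEMMAS AND PROOFS =====

-- A's dict-building step is exactly Counter's step
theorem step_eq_counter_step (d : PySem.Dict Int Int) (v : Int) :
    (if d.contains v then d.modify v 0 (· + 1) else d.insert v 1) = d.modify v 0 (· + 1) := by
  by_cases h : d.contains v = true
  · simp [h]
  · simp [h, PySem.Dict.modify, PySem.Dict.getD_of_not_contains]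

-- find? commutes with the ordered-dedup fold that builds a PySem.Set
theorem find?_foldl_add (p : Int → Bool) :
    ∀ (xs s : List Int), (xs.foldl PySem.Set.add s).find? p = (s ++ xs).find? p := by
  intro xs
  induction xs with
  | nil => intro s; simp
  | cons x xs ih =>
    intro s
    simp only [List.foldl_cons]
    rw [ih (PySem.Set.add s x)]
    by_cases hm : x ∈ s
    · have hadd : PySem.Set.add s x = s := by simp [PySem.Set.add, hm]
      rw [hadd, List.find?_append, List.find?_append]
      cases hp : p x
      · simp [hp]
      · have hsome : (s.find? p).isSome := List.find?_isSome.mpr ⟨x, hm, hp⟩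
        cases hs : s.find? p with
        | none => simp [hs] at hsome
        | some w => simp [Option.or]
    · have hadd : PySem.Set.add s x = s ++ [x] := by simp [PySem.Set.add, hm]
      rw [hadd]
      simp

-- A's item scan over a (key, count) map is a find? over the keys
theorem scan_map_eq_find? (arr : Int → Nat) :
    ∀ (s : List Int),
      onceTwiceScan (s.map (fun k => (k, (arr k : Int)))) =
        (s.find? (fun v => arr v == 1)).getD (-1) := by
  intro s
  induction s with
  | nil => simp [onceTwiceScan]
  | cons k s ih =>
    by_cases h : arr k = 1
    · simp [onceTwiceScan, h]
    · have h1 : ((arr k : Int) = 1) = False := by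
        simp; omega
      simp [onceTwiceScan, h, h1, ih]

-- A computes the first value of arr whose multiplicity in arr is 1 (default -1)
theorem onceTwice_eq_find? (arr : List Int) :
    onceTwice arr = (arr.find? (fun v => List.count v arr == 1)).getD (-1) := by
  unfold onceTwice
  have hstep :
      (fun (d : PySem.Dict Int Int) (v : Int) =>
        if d.contains v then d.modify v 0 (· + 1) else d.insert v 1) =
      (fun (d : PySem.Dict Int Int) (v : Int) => d.modify v 0 (· + 1)) := by
    funext d v; exact step_eq_counter_step d v
  simp only [hstep, ← PySem.Dict.counter_eq_foldl, PySem.Dict.items_counter]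
  rw [scan_map_eq_find? (fun k => List.count k arr) (PySem.Set.ofList arr)]
  unfold PySem.Set.ofList
  rw [find?_foldl_add]
  simp [PySem.Set.empty]

-- Loop invariant of B's single pass over the prefix p: the candidate dict holds exactly the
-- first-occurrence-ordered values of multiplicity 1 in p (each mapped to true), and the dupe
-- set holds exactly the values of multiplicity ≥ 2 in p.
theorem altFold_inv :
    ∀ (p : List Int),
      (p.foldl onceTwiceAltStep (PySem.Dict.empty, PySem.Set.empty)).1.items =
        ((PySem.Set.ofList p).filter (fun k => p.count k == 1)).map (fun k => (k, true)) ∧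
      (∀ k : Int, k ∈ (p.foldl onceTwiceAltStep (PySem.Dict.empty, PySem.Set.empty)).2 ↔
        2 ≤ p.count k) := by
  intro p
  induction p using List.reverseRecOn with
  | nil => simp [PySem.Set.ofList, PySem.Set.empty, PySem.Dict.empty]
  | append_singleton q v ih =>
    obtain ⟨ih1, ih2⟩ := ih
    rw [List.foldl_append, List.foldl_cons, List.foldl_nil]
    have hofq : PySem.Set.ofList (q ++ [v]) = PySem.Set.add (PySem.Set.ofList q) v := by
      simp [PySem.Set.ofList, List.foldl_append]
    have hcnt : ∀ k : Int, (q ++ [v]).count k = q.count k + (if k = v then 1 else 0) := by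
      intro k
      by_cases h : k = v
      · simp [List.count_append, h]
      · simp [List.count_append, h, Ne.symm h]
    have hkeys : (q.foldl onceTwiceAltStep (PySem.Dict.empty, PySem.Set.empty)).1.keys =
        (PySem.Set.ofList q).filter (fun k => q.count k == 1) := by
      simp only [PySem.Dict.keys, ih1, List.map_map]
      simp [Function.comp_def]
    have hc : (q.foldl onceTwiceAltStep (PySem.Dict.empty, PySem.Set.empty)).1.contains v = true ↔
        q.count v = 1 := by
      rw [PySem.Dict.contains_iff_mem_keys, hkeys, List.mem_filter]
      constructor
      · intro ⟨_, h⟩; simpa using h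
      · intro h
        exact ⟨(PySem.Set.mem_ofList q v).mpr (List.count_pos_iff.mp (by omega)), by simp [h]⟩
    constructor
    · -- candidate dict component
      rw [onceTwiceAltStep]
      by_cases hdup : v ∈ (q.foldl onceTwiceAltStep (PySem.Dict.empty, PySem.Set.empty)).2
      · -- v already a dupe: state unchanged; multiplicity-1 values unchanged
        have hv2 : 2 ≤ q.count v := (ih2 v).mp hdup
        have hvin : v ∈ q := List.count_pos_iff.mp (by omega)
        rw [if_pos hdup]
        rw [ih1, hofq]
        have : PySem.Set.add (PySem.Set.ofList q) v = PySem.Set.ofList q := by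
          simp [PySem.Set.add, PySem.Set.contains, PySem.Set.mem_ofList, hvin]
        rw [this]
        apply congrArg (List.map _)
        apply List.filter_congr
        intro k hk
        rw [hcnt k]
        by_cases hkv : k = v
        · subst hkv; simp; omega
        · simp [hkv]
      · by_cases hcand :
            (q.foldl onceTwiceAltStep (PySem.Dict.empty, PySem.Set.empty)).1.contains v = true
        · -- second occurrence: delete v from candidates
          have hv1 : q.count v = 1 := hc.mp hcand
          have hvin : v ∈ q := List.count_pos_iff.mp (by omega)
          rw [if_neg hdup, if_pos hcand]
          dsimp only
          simp only [PySem.Dict.erase]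
          rw [ih1, hofq]
          have hadd : PySem.Set.add (PySem.Set.ofList q) v = PySem.Set.ofList q := by
            simp [PySem.Set.add, PySem.Set.contains, PySem.Set.mem_ofList, hvin]
          rw [hadd, List.filter_map, List.filter_filter]
          apply congrArg (List.map _)
          apply List.filter_congr
          intro k hk
          rw [hcnt k]
          by_cases hkv : k = v
          · subst hkv; simp [hv1]
          · simp [hkv]
        · -- first occurrence: append v to candidates
          have hv0 : q.count v = 0 := by
            rcases Nat.lt_or_ge (q.count v) 1 with h | h
            · omega
            · rcases Nat.lt_or_ge (q.count v) 2 with h2 | h2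
              · exact absurd (hc.mpr (by omega)) hcand
              · exact absurd ((ih2 v).mpr h2) hdup
          have hvnin : v ∉ q := by
            intro hvin
            exact absurd hv0 (by have := List.count_pos_iff.mpr hvin; omega)
          rw [if_neg hdup, if_neg hcand]
          dsimp only
          rw [PySem.Dict.items_insert_of_not_contains _ true (by simpa using hcand)]
          rw [ih1, hofq]
          have hadd : PySem.Set.add (PySem.Set.ofList q) v =
              PySem.Set.ofList q ++ [v] := by
            simp [PySem.Set.add, PySem.Set.contains, PySem.Set.mem_ofList, hvnin]
          rw [hadd, List.filter_append]
          have hright : List.filter (fun k => (q ++ [v]).count k == 1) [v] = [v] := by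
            simp [hv0]
          rw [hright, List.map_append]
          congr 2
          apply List.filter_congr
          intro k hk
          have hkv : k ≠ v := by
            intro h; subst h
            exact hvnin ((PySem.Set.mem_ofList q k).mp hk)
          rw [hcnt k]
          simp [hkv]
    · -- dupe set component
      intro k
      rw [onceTwiceAltStep]
      by_cases hdup : v ∈ (q.foldl onceTwiceAltStep (PySem.Dict.empty, PySem.Set.empty)).2
      · have hv2 : 2 ≤ q.count v := (ih2 v).mp hdup
        rw [if_pos hdup]
        rw [ih2 k, hcnt k]
        by_cases hkv : k = v
        · subst hkv; rw [if_pos rfl]; omega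
        · simp [hkv]
      · by_cases hcand :
            (q.foldl onceTwiceAltStep (PySem.Dict.empty, PySem.Set.empty)).1.contains v = true
        · have hv1 : q.count v = 1 := hc.mp hcand
          rw [if_neg hdup, if_pos hcand]
          dsimp only
          rw [PySem.Set.mem_add, ih2 k, hcnt k]
          by_cases hkv : k = v
          · subst hkv; simp [hv1]
          · simp [hkv]
        · have hv0 : q.count v = 0 := by
            rcases Nat.lt_or_ge (q.count v) 1 with h | h
            · omega
            · rcases Nat.lt_or_ge (q.count v) 2 with h2 | h2
              · exact absurd (hc.mpr (by omega)) hcand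
              · exact absurd ((ih2 v).mpr h2) hdup
          rw [if_neg hdup, if_neg hcand]
          dsimp only
          rw [ih2 k, hcnt k]
          by_cases hkv : k = v
          · subst hkv; rw [if_pos rfl, hv0]; omega
          · simp [hkv]

-- B computes the same first value of multiplicity 1 (default -1)
theorem onceTwice_alt_eq_find? (arr : List Int) :
    onceTwice_alt arr = (arr.find? (fun v => List.count v arr == 1)).getD (-1) := by
  unfold onceTwice_alt
  obtain ⟨h1, _⟩ := altFold_inv arr
  have hkeys : (arr.foldl onceTwiceAltStep (PySem.Dict.empty, PySem.Set.empty)).1.keys =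
      (PySem.Set.ofList arr).filter (fun k => arr.count k == 1) := by
    simp only [PySem.Dict.keys, h1, List.map_map]
    simp [Function.comp_def]
  have hhead :
      (arr.foldl onceTwiceAltStep (PySem.Dict.empty, PySem.Set.empty)).1.keys.head? =
        arr.find? (fun v => List.count v arr == 1) := by
    rw [hkeys, List.head?_filter]
    have : (PySem.Set.ofList arr).find? (fun v => List.count v arr == 1) =
        arr.find? (fun v => List.count v arr == 1) := by
      unfold PySem.Set.ofList
      rw [find?_foldl_add]
      simp [PySem.Set.empty]
    simpa [List.count] using this
  show (match (arr.foldl onceTwiceAltStep (PySem.Dict.empty, PySem.Set.empty)).1.keys with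
        | [] => (-1 : Int)
        | w :: _ => w) = _
  cases hm : (arr.foldl onceTwiceAltStep (PySem.Dict.empty, PySem.Set.empty)).1.keys with
  | nil => rw [hm] at hhead; simp [← hhead]
  | cons w rest => rw [hm] at hhead; simp [← hhead]

-- ===== VERDICT (by name: the statement is the Claim_ definition above) =====
theorem onceTwice_spec : Claim_equal_onceTwice := by
  intro arr _
  show onceTwice arr = onceTwice_alt arr
  rw [onceTwice_eq_find?, onceTwice_alt_eq_find?]
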